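-- pv_equiv track=rewrite | github.com/starcrown001/test_flashmask | benchmark_magiattention_cp.py | generate_document_mask
-- ===== SOURCE A (Python) =====
-- def seqlens2cu_seqlens(seqlens: list[int]) -> list[int]:
--     """transfer seqlens list to cu_seqlens, do not have check"""
--     cu_seqlens = [0]
--     for seqlen in seqlens:
--         cu_seqlens.append(cu_seqlens[-1] + seqlen)
--     return cu_seqlens
--
-- def generate_document_mask(doc_seq_lens=[2538, 1742, 3213]) -> tuple[list[list[int]], list[list[int]], list[bool]]:
--     """generate document full maks (varlen full mask)"""
--     seqlens = doc_seq_lens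
--     cu_seqlens = seqlens2cu_seqlens(seqlens)
--
--     ranges = []
--     for i in range(len(seqlens)):
--         ranges.append([cu_seqlens[i], cu_seqlens[i + 1]])
--
--     is_causal_mapping = [False] * len(seqlens)
--
--     return (ranges, ranges, is_causal_mapping)
-- ===== SOURCE B (Python) =====
-- def generate_document_mask(doc_seq_lens=[2538, 1742, 3213]) -> tuple[list[list[int]], list[list[int]], list[bool]]:
--     """generate document full mask (varlen full mask)"""
--     ranges = []
--     start = 0
--     for seqlen in doc_seq_lens:
--         ranges.append([start, start + seqlen])
--         start += seqlen
--     is_causal_mapping = [False] * len(doc_seq_lens)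
--     return (ranges, ranges, is_causal_mapping)
-- ===== Notes on version B (the rewrite author's own statement) =====
-- stated objective: simpler
-- what changed: Dropped the seqlens2cu_seqlens helper and the index-based second loop: a single loop over doc_seq_lens maintains a running start offset and emits [start, start+seqlen] directly, with no cumulative-sums list and no indexing.
import Mathlib
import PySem

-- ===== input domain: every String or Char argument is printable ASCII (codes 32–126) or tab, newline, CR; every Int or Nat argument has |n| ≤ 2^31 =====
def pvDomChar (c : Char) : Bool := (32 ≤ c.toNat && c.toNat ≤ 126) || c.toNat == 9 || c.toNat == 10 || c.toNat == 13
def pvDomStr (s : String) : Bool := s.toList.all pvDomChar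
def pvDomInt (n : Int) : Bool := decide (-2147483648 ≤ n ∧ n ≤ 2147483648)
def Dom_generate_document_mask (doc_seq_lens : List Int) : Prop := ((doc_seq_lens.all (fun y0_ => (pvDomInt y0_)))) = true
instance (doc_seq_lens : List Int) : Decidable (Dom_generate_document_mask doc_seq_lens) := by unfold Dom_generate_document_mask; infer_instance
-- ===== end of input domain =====

-- B replaces the cumulative-sums helper + index loop by one pass keeping a running start offset (simpler decomposition, same O(n) cost).
-- Both programs return the SAME list object twice in the tuple (pure values here, so only the value matters).


-- ===== PORT A =====
def seqlens2cu_seqlens (seqlens : List Int) : List Int :=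
  seqlens.foldl (fun cu s => cu ++ [PySem.List.pyGetD cu (-1) 0 + s]) [0]

def generate_document_mask (doc_seq_lens : List Int) : List (List Int) × List (List Int) × List Bool :=
  let seqlens := doc_seq_lens
  let cu_seqlens := seqlens2cu_seqlens seqlens
  -- indices i and i+1 are always in range of cu_seqlens (length = len+1), so pyGetD is exact here
  let ranges := (PySem.List.pyRange 0 (seqlens.length : Int) 1).foldl
    (fun r i => r ++ [[PySem.List.pyGetD cu_seqlens i 0, PySem.List.pyGetD cu_seqlens (i + 1) 0]]) []
  let is_causal_mapping := List.replicate seqlens.length false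
  (ranges, ranges, is_causal_mapping)

-- ===== PORT B =====
def generate_document_mask_alt (doc_seq_lens : List Int) : List (List Int) × List (List Int) × List Bool :=
  let p := doc_seq_lens.foldl
    (fun (acc : List (List Int) × Int) seqlen => (acc.1 ++ [[acc.2, acc.2 + seqlen]], acc.2 + seqlen))
    ([], 0)
  let is_causal_mapping := List.replicate doc_seq_lens.length false
  (p.1, p.1, is_causal_mapping)

-- ===== PRECONDITION & SPEC =====
def Spec_generate_document_mask (doc_seq_lens : List Int) (out : List (List Int) × List (List Int) × List Bool) : Prop := out = generate_document_mask_alt doc_seq_lens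
instance (doc_seq_lens : List Int) (out : List (List Int) × List (List Int) × List Bool) : Decidable (Spec_generate_document_mask doc_seq_lens out) := by unfold Spec_generate_document_mask; infer_instance

-- ===== CLAIM (what is proved, stated in full; the proofs are below) =====
def Claim_equal_generate_document_mask : Prop := ∀ (doc_seq_lens : List Int), Dom_generate_document_mask doc_seq_lens → Spec_generate_document_mask doc_seq_lens (generate_document_mask doc_seq_lens)

-- ===== LEMMAS AND PROOFS =====

-- recursive characterization of the cumulative-sums list built by A's helper
def cuAux (t : Int) : List Int → List Int
  | [] => [t]
  | s :: rest => t :: cuAux (t + s) rest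

-- recursive characterization of B's ranges
def rbAux (t : Int) : List Int → List (List Int)
  | [] => []
  | s :: rest => [t, t + s] :: rbAux (t + s) rest

theorem cuAux_foldl (l : List Int) : ∀ (acc : List Int) (t : Int),
    l.foldl (fun cu s => cu ++ [PySem.List.pyGetD cu (-1) 0 + s]) (acc ++ [t]) = acc ++ cuAux t l := by
  induction l with
  | nil => intro acc t; simp [cuAux]
  | cons s rest ih =>
    intro acc t
    simp only [List.foldl_cons, PySem.List.pyGetD_neg_one_append_singleton, cuAux]
    rw [show acc ++ [t] ++ [t + s] = (acc ++ [t]) ++ [t + s] by simp, ih (acc ++ [t]) (t + s)]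
    simp

theorem seqlens2cu_eq (l : List Int) : seqlens2cu_seqlens l = cuAux 0 l := by
  have := cuAux_foldl l [] 0
  simpa [seqlens2cu_seqlens] using this

theorem cuAux_getD_zero (t : Int) (l : List Int) : (cuAux t l)[0]?.getD 0 = t := by
  cases l <;> simp [cuAux]

theorem ranges_eq (l : List Int) : ∀ t : Int,
    (List.range l.length).map
      (fun k => [(cuAux t l).getD k 0, (cuAux t l).getD (k + 1) 0]) = rbAux t l := by
  induction l with
  | nil => intro t; simp [rbAux]
  | cons s rest ih =>
    intro t
    simp only [List.length_cons]
    rw [List.range_succ_eq_map]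
    simp only [List.map_cons, List.map_map, cuAux, rbAux]
    congr 1
    · simp [cuAux_getD_zero]
    · rw [← ih (t + s)]
      apply List.map_congr_left
      intro k _
      simp [Function.comp]

theorem foldl_alt (l : List Int) : ∀ (r : List (List Int)) (t : Int),
    (l.foldl (fun (acc : List (List Int) × Int) s => (acc.1 ++ [[acc.2, acc.2 + s]], acc.2 + s)) (r, t)).1
      = r ++ rbAux t l := by
  induction l with
  | nil => intro r t; simp [rbAux]
  | cons s rest ih =>
    intro r t
    simp only [List.foldl_cons, rbAux]
    rw [ih (r ++ [[t, t + s]]) (t + s)]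
    simp

-- ===== VERDICT (by name: the statement is the Claim_ definition above) =====
theorem generate_document_mask_spec : Claim_equal_generate_document_mask := by
  intro l _
  unfold Spec_generate_document_mask generate_document_mask generate_document_mask_alt
  dsimp only
  rw [foldl_alt l [] 0]
  simp only [List.nil_append]
  have hr : (PySem.List.pyRange 0 (l.length : Int) 1).foldl
      (fun r i => r ++ [[PySem.List.pyGetD (seqlens2cu_seqlens l) i 0,
                         PySem.List.pyGetD (seqlens2cu_seqlens l) (i + 1) 0]]) []
      = rbAux 0 l := by
    rw [PySem.List.foldl_append_singleton_eq_map, seqlens2cu_eq]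
    rw [show (0 : Int) = ((0 : Nat) : Int) by simp, PySem.List.pyRange_one]
    simp only [Int.natCast_zero, Int.sub_zero, Int.toNat_natCast, List.map_map]
    rw [← ranges_eq l 0]
    apply List.map_congr_left
    intro k _
    simp [Function.comp]
    rw [show ((k : Int) + 1) = ((k + 1 : Nat) : Int) by push_cast; ring,
        PySem.List.pyGetD_natCast]
    simp [List.getD]
  simp [hr]
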